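-- pv_equiv track=rewrite | github.com/raulfauste/DAA | Ejercicios/RecursividadCola.py | funcionParImpar
-- ===== SOURCE A (Python) =====
-- def funcionParImpar(lista,sup,inf,ind):
--     if inf>sup:
--         return ind
--     else:
--         mitad = (inf +sup)//2
--         if lista[mitad]%2==0:
--             ind = max(ind,mitad)
--             return funcionParImpar(lista,sup,mitad+1,ind)
--         else:
--             return funcionParImpar(lista,mitad-1,inf,ind)
-- ===== SOURCE B (Python) =====
-- def funcionParImpar(lista, sup, inf, ind):
--     # Explicit while-loop over mutable state (sup, inf, ind) instead of tail recursion.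
--     while inf <= sup:
--         mitad = (inf + sup) // 2
--         if lista[mitad] % 2 == 0:
--             ind = max(ind, mitad)
--             inf = mitad + 1
--         else:
--             sup = mitad - 1
--     return ind
-- ===== Notes on version B (the rewrite author's own statement) =====
-- stated objective: idiomatic
-- what changed: Replaces the tail recursion by an explicit while loop mutating a (sup, inf, ind) state (ported as a bounded iteration of a step function on the state tuple).
-- outside the precondition, e.g. on funcionParImpar([2], 0, -2, 0): A returns 0, B returns 0
import Mathlib
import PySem

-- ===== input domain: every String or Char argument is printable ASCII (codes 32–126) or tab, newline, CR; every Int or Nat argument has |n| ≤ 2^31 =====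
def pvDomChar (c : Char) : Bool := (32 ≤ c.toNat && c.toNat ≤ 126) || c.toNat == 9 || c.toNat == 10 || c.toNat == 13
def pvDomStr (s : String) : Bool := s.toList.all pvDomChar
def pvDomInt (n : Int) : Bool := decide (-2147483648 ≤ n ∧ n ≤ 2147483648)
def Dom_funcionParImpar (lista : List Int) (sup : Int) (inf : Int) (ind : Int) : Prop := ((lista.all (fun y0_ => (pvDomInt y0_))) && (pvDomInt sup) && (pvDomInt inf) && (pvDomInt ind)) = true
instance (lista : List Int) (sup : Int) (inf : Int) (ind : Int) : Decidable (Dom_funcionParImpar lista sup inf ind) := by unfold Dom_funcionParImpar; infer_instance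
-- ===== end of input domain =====

-- B replaces A's tail recursion by an explicit while loop mutating a (sup, inf, ind)
-- state; the port runs a one-iteration step function under a sufficient fuel bound
-- (the standard faithful rendering of a while loop). Objective: idiomatic decomposition.

-- ===== PORT A =====
-- literal transliteration of A's tail recursion; lista[mitad] is pyGetD (in range under Pre_).
def funcionParImpar (lista : List Int) (sup : Int) (inf : Int) (ind : Int) : Int :=
  if inf > sup then ind
  else  -- mitad = (inf+sup)//2, inlined
    if PySem.Int.mod (PySem.List.pyGetD lista (PySem.Int.floordiv (inf + sup) 2) 0) 2 == 0 then
      funcionParImpar lista sup (PySem.Int.floordiv (inf + sup) 2 + 1) (max ind (PySem.Int.floordiv (inf + sup) 2))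
    else
      funcionParImpar lista (PySem.Int.floordiv (inf + sup) 2 - 1) inf ind
termination_by (sup + 1 - inf).toNat
decreasing_by
  all_goals
    have hle : inf ≤ sup := by omega
    have h2 := PySem.Int.floordiv_two_mid_bounds hle
    omega

-- ===== PORT B =====
-- one iteration of Source B's while-loop body on the loop state (sup, inf, ind);
-- a state with inf > sup is already terminal and is left unchanged.
def pvLoopStep (lista : List Int) : Int × Int × Int → Int × Int × Int
  | (sup, inf, ind) =>
      match decide (inf ≤ sup) with
      | false => (sup, inf, ind)
      | true =>
          let mitad := PySem.Int.floordiv (inf + sup) 2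
          match PySem.Int.mod (PySem.List.pyGetD lista mitad 0) 2 == 0 with
          | true  => (sup, mitad + 1, max ind mitad)
          | false => (mitad - 1, inf, ind)

-- the while loop: the interval shrinks every iteration, so (sup+1-inf).toNat
-- iterations of the step are enough fuel; the answer is the final ind component.
def funcionParImpar_alt (lista : List Int) (sup : Int) (inf : Int) (ind : Int) : Int :=
  ((pvLoopStep lista)^[(sup + 1 - inf).toNat] (sup, inf, ind)).2.2

-- ===== PRECONDITION & SPEC =====
-- Pre_ excludes the inputs on which A raises IndexError (a probed midpoint outside Python's
-- valid, possibly negative, index range); for uniformity it also excludes the few inputs with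
-- out-of-range initial bounds whose whole midpoint path happens to stay in range (both programs
-- return the same value there, via Python's negative-index lookup, which the ports do not model).
def Pre_funcionParImpar (lista : List Int) (sup : Int) (inf : Int) (ind : Int) : Prop :=
  inf > sup ∨ (-(lista.length : Int) ≤ inf ∧ sup < lista.length)
instance (lista : List Int) (sup : Int) (inf : Int) (ind : Int) : Decidable (Pre_funcionParImpar lista sup inf ind) := by unfold Pre_funcionParImpar; infer_instance

def pvWitness_funcionParImpar : List Int × Int × Int × Int := ([2, 4, 5], 2, 0, -1)

def Spec_funcionParImpar (lista : List Int) (sup : Int) (inf : Int) (ind : Int) (out : Int) : Prop := out = funcionParImpar_alt lista sup inf ind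
instance (lista : List Int) (sup : Int) (inf : Int) (ind : Int) (out : Int) : Decidable (Spec_funcionParImpar lista sup inf ind out) := by unfold Spec_funcionParImpar; infer_instance

-- ===== CLAIM (what is proved, stated in full; the proofs are below) =====
def Claim_equal_funcionParImpar : Prop := ∀ (lista : List Int) (sup : Int) (inf : Int) (ind : Int), Dom_funcionParImpar lista sup inf ind → Pre_funcionParImpar lista sup inf ind → Spec_funcionParImpar lista sup inf ind (funcionParImpar lista sup inf ind)

-- ===== LEMMAS AND PROOFS =====
-- a terminal state is a fixed point of the step
theorem pvLoopStep_done (lista : List Int) (sup inf ind : Int) (h : ¬ inf ≤ sup) :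
    pvLoopStep lista (sup, inf, ind) = (sup, inf, ind) := by
  simp [pvLoopStep, h]

theorem pvLoopStep_iter_done (lista : List Int) (n : ℕ) (sup inf ind : Int) (h : ¬ inf ≤ sup) :
    (pvLoopStep lista)^[n] (sup, inf, ind) = (sup, inf, ind) := by
  induction n with
  | zero => rfl
  | succ n ih => rw [Function.iterate_succ_apply, pvLoopStep_done lista sup inf ind h, ih]

-- with enough fuel, the iterated loop step computes A's recursion
theorem iter_eq_funcionParImpar (lista : List Int) (fuel : ℕ) :
    ∀ (sup inf ind : Int), (sup + 1 - inf).toNat ≤ fuel →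
      ((pvLoopStep lista)^[fuel] (sup, inf, ind)).2.2 = funcionParImpar lista sup inf ind := by
  induction fuel with
  | zero =>
      intro sup inf ind h
      have hgt : inf > sup := by omega
      rw [funcionParImpar]
      simp [hgt]
  | succ fuel ih =>
      intro sup inf ind h
      by_cases hle : inf ≤ sup
      · have h2 := PySem.Int.floordiv_two_mid_bounds hle
        rw [Function.iterate_succ_apply]
        rw [funcionParImpar]
        simp only [pvLoopStep, decide_eq_true hle]
        cases heven : PySem.Int.mod (PySem.List.pyGetD lista (PySem.Int.floordiv (inf + sup) 2) 0) 2 == 0 with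
        | true =>
            simp only [if_neg (not_lt.mpr hle), if_true]
            exact ih sup (PySem.Int.floordiv (inf + sup) 2 + 1) (max ind (PySem.Int.floordiv (inf + sup) 2)) (by omega)
        | false =>
            simp only [if_neg (not_lt.mpr hle), Bool.false_eq_true, if_false]
            exact ih (PySem.Int.floordiv (inf + sup) 2 - 1) inf ind (by omega)
      · rw [pvLoopStep_iter_done lista _ sup inf ind hle, funcionParImpar]
        simp [lt_of_not_ge hle]

-- ===== VERDICT (by name: the statement is the Claim_ definition above) =====
theorem funcionParImpar_spec : Claim_equal_funcionParImpar := by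
  intro lista sup inf ind _ _
  exact (iter_eq_funcionParImpar lista _ sup inf ind le_rfl).symm
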